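-- pv_equiv track=rewrite | github.com/AmanKishore/CodingChallenges | Arrays and Strings/SingleRiffle.py | is_single_riffle
-- ===== SOURCE A (Python) =====
-- def is_single_riffle(half1, half2, shuffled_deck):
--     idx1, idx2 = 0, 0
--
--     for card in shuffled_deck:
--         if idx1 <= len(half1) - 1 and card == half1[idx1]: # Top card is in half1
--             idx1 += 1
--         elif idx2 <= len(half2) - 1 and card == half2[idx2]: # Top card is in half2
--             idx2 += 1
--         else:  # If the top card in shuffled_deck doesn't match the top
--             return False
--     return True
-- ===== SOURCE B (Python) =====
-- def is_single_riffle(half1, half2, shuffled_deck):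
--     # Treat the two halves as physical stacks of cards (top = last element of the
--     # reversed copy) and pop a card off whichever stack matches, half1 preferred.
--     stack1 = half1[::-1]
--     stack2 = half2[::-1]
--     for card in shuffled_deck:
--         if stack1 and stack1[-1] == card:
--             stack1.pop()
--         elif stack2 and stack2[-1] == card:
--             stack2.pop()
--         else:
--             return False
--     return True
-- ===== Notes on version B (the rewrite author's own statement) =====
-- stated objective: alternative
-- what changed: B replaces A's two integer index accumulators and per-iteration len()-bound arithmetic with two physical stacks (reversed copies of the halves) that are popped as cards are matched; the state maintained and the way the halves are traversed differ.
import Mathlib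
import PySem

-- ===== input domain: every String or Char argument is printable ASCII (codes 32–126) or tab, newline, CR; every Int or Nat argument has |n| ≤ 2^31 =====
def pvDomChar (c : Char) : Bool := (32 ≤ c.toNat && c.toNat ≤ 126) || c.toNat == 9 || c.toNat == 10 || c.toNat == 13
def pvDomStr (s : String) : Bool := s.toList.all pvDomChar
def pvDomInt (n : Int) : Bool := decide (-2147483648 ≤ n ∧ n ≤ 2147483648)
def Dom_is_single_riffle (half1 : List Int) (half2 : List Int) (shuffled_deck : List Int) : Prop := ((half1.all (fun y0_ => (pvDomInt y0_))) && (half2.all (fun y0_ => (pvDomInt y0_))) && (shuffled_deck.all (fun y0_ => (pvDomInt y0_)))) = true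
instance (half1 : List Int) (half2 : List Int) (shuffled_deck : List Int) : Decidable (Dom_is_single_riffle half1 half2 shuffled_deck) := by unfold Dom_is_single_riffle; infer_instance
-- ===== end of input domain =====

-- B replaces A's two integer index accumulators with two stacks (reversed copies of the
-- halves) popped as cards match; same greedy result, no speed claim (objective: alternative).

-- ===== PORT A =====
-- A's for-loop with early return, carrying the two integer indices idx1, idx2.
def riffleLoopA (half1 : List Int) (half2 : List Int) (deck : List Int)
    (idx1 : Int) (idx2 : Int) : Bool :=
  match deck with
  | [] => true
  | card :: rest =>
    if idx1 ≤ (half1.length : Int) - 1 ∧ PySem.List.pyGet? half1 idx1 = some card then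
      riffleLoopA half1 half2 rest (idx1 + 1) idx2
    else if idx2 ≤ (half2.length : Int) - 1 ∧ PySem.List.pyGet? half2 idx2 = some card then
      riffleLoopA half1 half2 rest idx1 (idx2 + 1)
    else false

def is_single_riffle (half1 : List Int) (half2 : List Int) (shuffled_deck : List Int) : Bool :=
  riffleLoopA half1 half2 shuffled_deck 0 0

-- ===== PORT B =====
-- B's loop: pop from the top (last element) of the reversed stacks.
def riffleGoB (stack1 : List Int) (stack2 : List Int) (deck : List Int) : Bool :=
  match deck with
  | [] => true
  | card :: rest =>
    if stack1 ≠ [] ∧ stack1.getLast? = some card then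
      riffleGoB stack1.dropLast stack2 rest
    else if stack2 ≠ [] ∧ stack2.getLast? = some card then
      riffleGoB stack1 stack2.dropLast rest
    else false

def is_single_riffle_alt (half1 : List Int) (half2 : List Int) (shuffled_deck : List Int) : Bool :=
  riffleGoB half1.reverse half2.reverse shuffled_deck

-- ===== PRECONDITION & SPEC =====
def Spec_is_single_riffle (half1 : List Int) (half2 : List Int) (shuffled_deck : List Int) (out : Bool) : Prop := out = is_single_riffle_alt half1 half2 shuffled_deck
instance (half1 : List Int) (half2 : List Int) (shuffled_deck : List Int) (out : Bool) : Decidable (Spec_is_single_riffle half1 half2 shuffled_deck out) := by unfold Spec_is_single_riffle; infer_instance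

-- ===== CLAIM (what is proved, stated in full; the proofs are below) =====
def Claim_equal_is_single_riffle : Prop := ∀ (half1 : List Int) (half2 : List Int) (shuffled_deck : List Int), Dom_is_single_riffle half1 half2 shuffled_deck → Spec_is_single_riffle half1 half2 shuffled_deck (is_single_riffle half1 half2 shuffled_deck)

-- ===== LEMMAS AND PROOFS =====

-- (drop n l).reverse is nonempty iff n < length
theorem drop_reverse_ne_nil {l : List Int} {n : Nat} (h : n < l.length) :
    (l.drop n).reverse ≠ [] := by
  simp [List.reverse_eq_nil_iff, List.drop_eq_nil_iff]; omega

-- top of the stack = element at index n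
theorem getLast_drop_reverse (l : List Int) (n : Nat) :
    (l.drop n).reverse.getLast? = l[n]? := by
  simp [List.getLast?_reverse, List.head?_drop]

-- popping the stack = advancing the index
theorem dropLast_drop_reverse (l : List Int) (n : Nat) :
    (l.drop n).reverse.dropLast = (l.drop (n + 1)).reverse := by
  rw [List.dropLast_reverse, List.tail_drop]

-- main invariant: A's loop at indices (i, j) equals B's loop on the residual stacks
theorem loop_eq (half1 half2 : List Int) (deck : List Int) :
    ∀ (i j : Nat), i ≤ half1.length → j ≤ half2.length →
    riffleLoopA half1 half2 deck (i : Int) (j : Int)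
      = riffleGoB (half1.drop i).reverse (half2.drop j).reverse deck := by
  induction deck with
  | nil => intro i j _ _; simp [riffleLoopA, riffleGoB]
  | cons card rest ih =>
    intro i j hi hj
    have c1 : ((i : Int) ≤ (half1.length : Int) - 1 ∧ PySem.List.pyGet? half1 (i : Int) = some card)
        ↔ ((half1.drop i).reverse ≠ [] ∧ (half1.drop i).reverse.getLast? = some card) := by
      rw [getLast_drop_reverse]
      constructor
      · rintro ⟨hb, hg⟩
        have hlt : i < half1.length := by omega
        refine ⟨drop_reverse_ne_nil hlt, ?_⟩
        rwa [PySem.List.pyGet?_natCast] at hg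
      · rintro ⟨hb, hg⟩
        have hlt : i < half1.length := by
          by_contra h
          exact hb (by simp [List.reverse_eq_nil_iff, List.drop_eq_nil_iff]; omega)
        exact ⟨by omega, by rwa [PySem.List.pyGet?_natCast]⟩
    have c2 : ((j : Int) ≤ (half2.length : Int) - 1 ∧ PySem.List.pyGet? half2 (j : Int) = some card)
        ↔ ((half2.drop j).reverse ≠ [] ∧ (half2.drop j).reverse.getLast? = some card) := by
      rw [getLast_drop_reverse]
      constructor
      · rintro ⟨hb, hg⟩
        have hlt : j < half2.length := by omega
        refine ⟨drop_reverse_ne_nil hlt, ?_⟩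
        rwa [PySem.List.pyGet?_natCast] at hg
      · rintro ⟨hb, hg⟩
        have hlt : j < half2.length := by
          by_contra h
          exact hb (by simp [List.reverse_eq_nil_iff, List.drop_eq_nil_iff]; omega)
        exact ⟨by omega, by rwa [PySem.List.pyGet?_natCast]⟩
    rw [riffleLoopA, riffleGoB]
    by_cases h1 : (i : Int) ≤ (half1.length : Int) - 1 ∧ PySem.List.pyGet? half1 (i : Int) = some card
    · have hlt : i < half1.length := by rcases h1 with ⟨hb, _⟩; omega
      rw [if_pos h1, if_pos (c1.mp h1)]
      have : ((i : Int) + 1) = ((i + 1 : Nat) : Int) := by push_cast; ring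
      rw [this, dropLast_drop_reverse, ih (i + 1) j (by omega) hj]
    · rw [if_neg h1, if_neg (fun hc => h1 (c1.mpr hc))]
      by_cases h2 : (j : Int) ≤ (half2.length : Int) - 1 ∧ PySem.List.pyGet? half2 (j : Int) = some card
      · have hlt : j < half2.length := by rcases h2 with ⟨hb, _⟩; omega
        rw [if_pos h2, if_pos (c2.mp h2)]
        have : ((j : Int) + 1) = ((j + 1 : Nat) : Int) := by push_cast; ring
        rw [this, dropLast_drop_reverse, ih i (j + 1) hi (by omega)]
      · rw [if_neg h2, if_neg (fun hc => h2 (c2.mpr hc))]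

-- ===== VERDICT (by name: the statement is the Claim_ definition above) =====
theorem is_single_riffle_spec : Claim_equal_is_single_riffle := by
  intro half1 half2 deck _
  unfold Spec_is_single_riffle is_single_riffle is_single_riffle_alt
  have := loop_eq half1 half2 deck 0 0 (Nat.zero_le _) (Nat.zero_le _)
  simpa using this
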